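-- pv_equiv track=rewrite | github.com/Rinshin-Jalal/youplus | agent/src/assistant.py | _build_context_section
-- ===== SOURCE A (Python) =====
-- from typing import Optional, Dict, Any
--
-- def _build_context_section(
--
--     user_context: Dict[str, Any],
-- ) -> str:
--     """Build context section from user memories"""
--     context = "\nUser Context (from previous calls):\n"
--
--     if user_context.get("promises"):
--         context += "Recent Promises:\n"
--         for promise in user_context.get("promises", [])[:3]:
--             context += f"- {promise}\n"
--
--     if user_context.get("goals"):
--         context += "Current Goals:\n"
--         for goal in user_context.get("goals", [])[:3]:
--             context += f"- {goal}\n"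
--
--     if user_context.get("progress"):
--         context += "Recent Progress:\n"
--         for progress in user_context.get("progress", [])[:3]:
--             context += f"- {progress}\n"
--
--     return context
-- ===== SOURCE B (Python) =====
-- def _build_context_section(user_context):
--     """Build context section as a list of LINES, produced by a recursion over the
--     section table that assembles the tail back-to-front, then joined once."""
--     def go(table):
--         if not table:
--             return []
--         (key, header), rest_lines = table[0], go(table[1:])
--         items = user_context.get(key)
--         if not items:
--             return rest_lines
--         return [header] + ["- " + str(x) for x in items[:3]] + rest_lines
--
--     lines = ["", "User Context (from previous calls):"] + go(
--         [("promises", "Recent Promises:"),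
--          ("goals", "Current Goals:"),
--          ("progress", "Recent Progress:")])
--     return "\n".join(lines) + "\n"
-- ===== Notes on version B (the rewrite author's own statement) =====
-- stated objective: alternative
-- what changed: Instead of A's imperative string accumulator with three unrolled if-blocks, B builds a LIST OF LINES via a recursion over a section table that constructs the suffix back-to-front, and materialises the string once with a single '\n'.join at the end.
import Mathlib
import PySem

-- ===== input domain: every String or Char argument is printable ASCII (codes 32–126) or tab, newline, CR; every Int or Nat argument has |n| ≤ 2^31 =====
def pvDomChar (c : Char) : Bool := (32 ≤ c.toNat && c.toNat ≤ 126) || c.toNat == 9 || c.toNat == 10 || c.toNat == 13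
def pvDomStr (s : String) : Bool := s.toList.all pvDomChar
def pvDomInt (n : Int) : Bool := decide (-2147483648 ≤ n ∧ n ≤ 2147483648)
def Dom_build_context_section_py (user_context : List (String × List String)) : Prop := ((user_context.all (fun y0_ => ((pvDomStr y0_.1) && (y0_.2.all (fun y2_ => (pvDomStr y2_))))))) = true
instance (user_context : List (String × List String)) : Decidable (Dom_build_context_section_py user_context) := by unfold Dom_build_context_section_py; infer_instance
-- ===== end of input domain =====

-- B builds a list of lines by a recursion over the section table (suffix assembled
-- back-to-front) and joins once with "\n", instead of A's imperative string accumulator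
-- with three unrolled if-blocks; objective: alternative.

-- ===== PORT A =====
-- Python truthiness of user_context.get(k): key present with a nonempty list.
def pvTruthy (o : Option (List String)) : Bool :=
  match o with
  | some l => !l.isEmpty
  | none => false

-- each block: 'context += header; for x in user_context.get(k, [])[:3]: context += f"- {x}\n"'
-- ([:3] with a nonnegative literal bound on a list is List.take 3 — exact)
def build_context_section_py (user_context : List (String × List String)) : String :=
  let d := PySem.Dict.mk user_context
  let context := "\nUser Context (from previous calls):\n"
  let context :=
    if pvTruthy (PySem.Dict.get? d "promises") then
      ((PySem.Dict.getD d "promises" []).take 3).foldl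
        (fun c p => c ++ ("- " ++ p ++ "\n")) (context ++ "Recent Promises:\n")
    else context
  let context :=
    if pvTruthy (PySem.Dict.get? d "goals") then
      ((PySem.Dict.getD d "goals" []).take 3).foldl
        (fun c p => c ++ ("- " ++ p ++ "\n")) (context ++ "Current Goals:\n")
    else context
  let context :=
    if pvTruthy (PySem.Dict.get? d "progress") then
      ((PySem.Dict.getD d "progress" []).take 3).foldl
        (fun c p => c ++ ("- " ++ p ++ "\n")) (context ++ "Recent Progress:\n")
    else context
  context

-- ===== PORT B =====
-- Source B's inner recursion 'go': consumes the section table, building the line list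
-- for the tail first ('rest_lines'), then prepending this section's lines if truthy.
-- (str(x) on a str is x itself; '[:3]' on a list is List.take 3 — exact.)
def pvGo (d : PySem.Dict String (List String)) : List (String × String) → List String
  | [] => []
  | (key, header) :: rest =>
      let rest_lines := pvGo d rest
      match PySem.Dict.get? d key with
      | none => rest_lines
      | some items =>
          if items.isEmpty then rest_lines
          else [header] ++ (items.take 3).map (fun x => "- " ++ x) ++ rest_lines

def build_context_section_py_alt (user_context : List (String × List String)) : String :=
  let d := PySem.Dict.mk user_context
  let lines := ["", "User Context (from previous calls):"] ++
    pvGo d [("promises", "Recent Promises:"),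
            ("goals", "Current Goals:"),
            ("progress", "Recent Progress:")]
  PySem.Str.join "\n" lines ++ "\n"

-- ===== PRECONDITION & SPEC =====
def Spec_build_context_section_py (user_context : List (String × List String)) (out : String) : Prop := out = build_context_section_py_alt user_context
instance (user_context : List (String × List String)) (out : String) : Decidable (Spec_build_context_section_py user_context out) := by unfold Spec_build_context_section_py; infer_instance

-- ===== CLAIM (what is proved, stated in full; the proofs are below) =====
def Claim_equal_build_context_section_py : Prop := ∀ (user_context : List (String × List String)), Dom_build_context_section_py user_context → Spec_build_context_section_py user_context (build_context_section_py user_context)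

-- ===== LEMMAS AND PROOFS =====

-- render a line list as A does: each line followed by '\n', concatenated
def pvRend : List String → String
  | [] => ""
  | l :: ls => l ++ "\n" ++ pvRend ls

theorem pvRend_append (a b : List String) : pvRend (a ++ b) = pvRend a ++ pvRend b := by
  induction a with
  | nil => simp [pvRend]
  | cons h t ih =>
      simp only [List.cons_append, pvRend, ih]
      apply String.toList_inj.mp
      simp

-- joining with "\n" and adding a trailing "\n" is pvRend, on nonempty line lists
theorem pv_join_trailing (l : List String) (hl : l ≠ []) :
    PySem.Str.join "\n" l ++ "\n" = pvRend l := by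
  induction l with
  | nil => exact absurd rfl hl
  | cons p rest ih =>
      cases rest with
      | nil =>
          apply String.toList_inj.mp
          simp [PySem.Str.toList_join, PySem.Chars.join_singleton, pvRend]
      | cons q r =>
          have h1 : PySem.Str.join "\n" (p :: q :: r) =
              p ++ "\n" ++ PySem.Str.join "\n" (q :: r) := by
            apply String.toList_inj.mp
            simp [PySem.Str.toList_join, PySem.Chars.join_cons_cons]
          have h2 := ih (by simp)
          simp only [pvRend, h1]
          rw [String.append_assoc, h2]
          simp [pvRend]

-- A's accumulator loop over taken items equals appending the rendered "- x" lines
theorem pv_foldl_eq_rend (l : List String) (c : String) :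
    l.foldl (fun c p => c ++ ("- " ++ p ++ "\n")) c
      = c ++ pvRend (l.map (fun x => "- " ++ x)) := by
  induction l generalizing c with
  | nil => simp [pvRend]
  | cons h t ih =>
      simp only [List.foldl_cons, List.map_cons, pvRend, ih]
      apply String.toList_inj.mp
      simp

-- proof-side shape of one of A's unrolled blocks
def pvSecA (d : PySem.Dict String (List String)) (k hdr c : String) : String :=
  if pvTruthy (PySem.Dict.get? d k) then
    ((PySem.Dict.getD d k []).take 3).foldl
      (fun c p => c ++ ("- " ++ p ++ "\n")) (c ++ (hdr ++ "\n"))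
  else c

-- one block of A appends exactly the rendered lines of one step of B's recursion
theorem pv_secA_eq_rend (d : PySem.Dict String (List String)) (k hdr c : String) :
    pvSecA d k hdr c = c ++ pvRend (pvGo d [(k, hdr)]) := by
  unfold pvSecA
  rcases h : PySem.Dict.get? d k with _ | items
  · simp [pvTruthy, pvGo, h, pvRend]
  · simp only [pvTruthy, PySem.Dict.getD_eq_get?_getD, h, Option.getD_some]
    by_cases he : items.isEmpty
    · simp [he, pvGo, h, pvRend]
    · simp only [he, Bool.not_false, if_true, pv_foldl_eq_rend]
      apply String.toList_inj.mp
      simp [pvGo, h, he, pvRend]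

-- B's recursion splits at the head of the table
theorem pvGo_cons (d : PySem.Dict String (List String)) (k h : String)
    (rest : List (String × String)) :
    pvGo d ((k, h) :: rest) = pvGo d [(k, h)] ++ pvGo d rest := by
  simp only [pvGo]
  rcases PySem.Dict.get? d k with _ | items
  · simp
  · by_cases he : items.isEmpty <;> simp [he]

-- ===== VERDICT (by name: the statement is the Claim_ definition above) =====
theorem build_context_section_py_spec : Claim_equal_build_context_section_py := by
  intro uc _
  show build_context_section_py uc = build_context_section_py_alt uc
  set d := PySem.Dict.mk uc with hd
  have hA : build_context_section_py uc =
      pvSecA d "progress" "Recent Progress:"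
        (pvSecA d "goals" "Current Goals:"
          (pvSecA d "promises" "Recent Promises:"
            "\nUser Context (from previous calls):\n")) := rfl
  have hgo : pvGo d [("promises", "Recent Promises:"),
      ("goals", "Current Goals:"), ("progress", "Recent Progress:")]
      = pvGo d [("promises", "Recent Promises:")] ++
        (pvGo d [("goals", "Current Goals:")] ++
          pvGo d [("progress", "Recent Progress:")]) := by
    rw [pvGo_cons]
    congr 1
    rw [pvGo_cons]
  have hB : build_context_section_py_alt uc =
      "\nUser Context (from previous calls):\n" ++
        (pvRend (pvGo d [("promises", "Recent Promises:")]) ++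
          (pvRend (pvGo d [("goals", "Current Goals:")]) ++
            pvRend (pvGo d [("progress", "Recent Progress:")]))) := by
    show PySem.Str.join "\n" _ ++ "\n" = _
    rw [pv_join_trailing _ (by simp)]
    rw [hgo]
    simp only [pvRend, pvRend_append]
    apply String.toList_inj.mp
    simp
  rw [hA, hB, pv_secA_eq_rend, pv_secA_eq_rend, pv_secA_eq_rend]
  apply String.toList_inj.mp
  simp
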